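-- pv_equiv track=rewrite | github.com/Anshuman2121/actionsspot2 | job_poller.py | _cpu_to_instance_type
-- ===== SOURCE A (Python) =====
-- def _cpu_to_instance_type(cpu_count: int) -> str:
--     """Map CPU count to appropriate instance type"""
--     cpu_map = {
--         1: 't3.micro',
--         2: 't3.medium',
--         4: 't3.xlarge',
--         8: 't3.2xlarge',
--         16: 'm5.4xlarge',
--         32: 'm5.8xlarge',
--         64: 'm5.16xlarge'
--     }
--
--     for cpu, instance_type in sorted(cpu_map.items()):
--         if cpu >= cpu_count:
--             return instance_type
--
--     return 'm5.16xlarge'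
-- ===== SOURCE B (Python) =====
-- _THRESHOLDS = [1, 2, 4, 8, 16, 32, 64]
-- _TYPES = ['t3.micro', 't3.medium', 't3.xlarge', 't3.2xlarge',
--           'm5.4xlarge', 'm5.8xlarge', 'm5.16xlarge']
--
--
-- def _bisect_left(xs, x):
--     lo, hi = 0, len(xs)
--     while lo < hi:
--         mid = (lo + hi) // 2
--         if xs[mid] < x:
--             lo = mid + 1
--         else:
--             hi = mid
--     return lo
--
--
-- def _cpu_to_instance_type(cpu_count: int) -> str:
--     idx = _bisect_left(_THRESHOLDS, cpu_count)
--     if idx < len(_TYPES):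
--         return _TYPES[idx]
--     return 'm5.16xlarge'
-- ===== Notes on version B (the rewrite author's own statement) =====
-- stated objective: idiomatic
-- what changed: Replaced the linear scan over the sorted dict items with a binary search (hand-written bisect_left) into two parallel constant tables of thresholds and instance types.
import Mathlib
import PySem

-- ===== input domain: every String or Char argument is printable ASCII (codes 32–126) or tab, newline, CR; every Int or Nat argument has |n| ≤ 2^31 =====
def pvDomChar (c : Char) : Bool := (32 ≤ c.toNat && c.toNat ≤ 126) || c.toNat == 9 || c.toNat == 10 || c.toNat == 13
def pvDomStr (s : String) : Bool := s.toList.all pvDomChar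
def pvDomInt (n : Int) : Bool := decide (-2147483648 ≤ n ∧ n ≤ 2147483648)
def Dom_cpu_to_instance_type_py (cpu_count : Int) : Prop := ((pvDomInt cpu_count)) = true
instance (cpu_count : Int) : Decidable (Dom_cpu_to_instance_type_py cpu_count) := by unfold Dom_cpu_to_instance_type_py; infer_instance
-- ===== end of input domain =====

-- B replaces A's linear scan of the sorted dict items with a binary search into
-- two parallel constant tables (objective: idiomatic). Same return value everywhere.

-- ===== PORT A =====
-- sorted(cpu_map.items()) of the 7-entry dict: keys are inserted in increasing
-- order, so the sorted item list is exactly the insertion-order list below.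
def cpuMapItems : List (Int × String) :=
  [(1, "t3.micro"), (2, "t3.medium"), (4, "t3.xlarge"), (8, "t3.2xlarge"),
   (16, "m5.4xlarge"), (32, "m5.8xlarge"), (64, "m5.16xlarge")]

-- the 'for … return … / fall through' loop of A
def cpuLoopA : List (Int × String) → Int → String
  | [], _ => "m5.16xlarge"
  | (cpu, instance_type) :: rest, cpu_count =>
      if cpu ≥ cpu_count then instance_type else cpuLoopA rest cpu_count

def cpu_to_instance_type_py (cpu_count : Int) : String :=
  cpuLoopA cpuMapItems cpu_count

-- ===== PORT B =====
def bThresholds : List Int := [1, 2, 4, 8, 16, 32, 64]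
def bTypes : List String :=
  ["t3.micro", "t3.medium", "t3.xlarge", "t3.2xlarge",
   "m5.4xlarge", "m5.8xlarge", "m5.16xlarge"]

-- hand-written bisect_left of Source B, as the same lo/hi loop
def bisectLeft (xs : List Int) (x : Int) (lo hi : Nat) : Nat :=
  if _h : lo < hi then
    let mid := (lo + hi) / 2
    if xs.getD mid 0 < x then bisectLeft xs x (mid + 1) hi
    else bisectLeft xs x lo mid
  else lo
termination_by hi - lo
decreasing_by all_goals omega

def cpu_to_instance_type_py_alt (cpu_count : Int) : String :=
  let idx := bisectLeft bThresholds cpu_count 0 bThresholds.length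
  if idx < bTypes.length then bTypes.getD idx "m5.16xlarge"
  else "m5.16xlarge"

-- ===== PRECONDITION & SPEC =====
def Spec_cpu_to_instance_type_py (cpu_count : Int) (out : String) : Prop := out = cpu_to_instance_type_py_alt cpu_count
instance (cpu_count : Int) (out : String) : Decidable (Spec_cpu_to_instance_type_py cpu_count out) := by unfold Spec_cpu_to_instance_type_py; infer_instance

-- ===== CLAIM (what is proved, stated in full; the proofs are below) =====
def Claim_equal_cpu_to_instance_type_py : Prop := ∀ (cpu_count : Int), Dom_cpu_to_instance_type_py cpu_count → Spec_cpu_to_instance_type_py cpu_count (cpu_to_instance_type_py cpu_count)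

-- ===== LEMMAS AND PROOFS =====

-- step/base evaluation lemmas for the concrete binary-search call tree
theorem bl_base (c : Int) (n : Nat) : bisectLeft bThresholds c n n = n := by
  rw [bisectLeft.eq_def]; simp

theorem bl07 (c : Int) : bisectLeft bThresholds c 0 7 =
    if 8 < c then bisectLeft bThresholds c 4 7 else bisectLeft bThresholds c 0 3 := by
  rw [bisectLeft.eq_def]; norm_num [bThresholds]

theorem bl47 (c : Int) : bisectLeft bThresholds c 4 7 =
    if 32 < c then bisectLeft bThresholds c 6 7 else bisectLeft bThresholds c 4 5 := by
  rw [bisectLeft.eq_def]; norm_num [bThresholds]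

theorem bl03 (c : Int) : bisectLeft bThresholds c 0 3 =
    if 2 < c then bisectLeft bThresholds c 2 3 else bisectLeft bThresholds c 0 1 := by
  rw [bisectLeft.eq_def]; norm_num [bThresholds]

theorem bl67 (c : Int) : bisectLeft bThresholds c 6 7 =
    if 64 < c then bisectLeft bThresholds c 7 7 else bisectLeft bThresholds c 6 6 := by
  rw [bisectLeft.eq_def]; norm_num [bThresholds]

theorem bl45 (c : Int) : bisectLeft bThresholds c 4 5 =
    if 16 < c then bisectLeft bThresholds c 5 5 else bisectLeft bThresholds c 4 4 := by
  rw [bisectLeft.eq_def]; norm_num [bThresholds]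

theorem bl23 (c : Int) : bisectLeft bThresholds c 2 3 =
    if 4 < c then bisectLeft bThresholds c 3 3 else bisectLeft bThresholds c 2 2 := by
  rw [bisectLeft.eq_def]; norm_num [bThresholds]

theorem bl01 (c : Int) : bisectLeft bThresholds c 0 1 =
    if 1 < c then bisectLeft bThresholds c 1 1 else bisectLeft bThresholds c 0 0 := by
  rw [bisectLeft.eq_def]; norm_num [bThresholds]

-- ===== VERDICT (by name: the statement is the Claim_ definition above) =====
theorem cpu_to_instance_type_py_spec : Claim_equal_cpu_to_instance_type_py := by
  intro c _
  unfold Spec_cpu_to_instance_type_py cpu_to_instance_type_py cpu_to_instance_type_py_alt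
  rw [show bThresholds.length = 7 from rfl, show bTypes.length = 7 from rfl]
  simp only [cpuMapItems, cpuLoopA, bl07, bl47, bl03, bl67, bl45, bl23, bl01, bl_base]
  split_ifs <;> first | rfl | omega
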